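-- pv_equiv track=rewrite | github.com/pwrwpw/Algorithm | 프로그래머스/1/140108. 문자열 나누기/문자열 나누기.py | solution
-- ===== SOURCE A (Python) =====
-- def solution(s):
--     answer = 0
--     first_cnt = 0
--     not_cnt = 0
--     first = ''
--     for i in s:
--         if first_cnt == not_cnt:
--             first_cnt += 1
--             first = i
--             answer += 1
--         elif first == i:
--             first_cnt += 1
--         else:
--             not_cnt += 1
--     return answer
-- ===== SOURCE B (Python) =====
-- def solution(s):
--     n = len(s)
--     # stage 1: per-character prefix-count table: prefix[x][k] = occurrences of x in s[:k]
--     prefix = {}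
--     for x in set(s):
--         row = [0]
--         c = 0
--         for ch in s:
--             if ch == x:
--                 c += 1
--             row.append(c)
--         prefix[x] = row
--     # stage 2: jump from segment start to segment end by pure arithmetic on the table
--     answer = 0
--     i = 0
--     while i < n:
--         answer += 1
--         p = prefix[s[i]]
--         j = i + 1
--         while j < n and 2 * (p[j] - p[i]) != j - i:
--             j += 1
--         i = j
--     return answer
-- ===== Notes on version B (the rewrite author's own statement) =====
-- stated objective: alternative
-- what changed: Replaced A's single character-by-character pass with running match/mismatch counters by a two-stage algorithm: first build a per-character prefix-count table (dict of arrays over set(s)), then walk segments by index, finding each segment end with a pure arithmetic test 2*(p[j]-p[i])==j-i on the table, with no character comparisons or counters in the scan.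
import Mathlib
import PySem

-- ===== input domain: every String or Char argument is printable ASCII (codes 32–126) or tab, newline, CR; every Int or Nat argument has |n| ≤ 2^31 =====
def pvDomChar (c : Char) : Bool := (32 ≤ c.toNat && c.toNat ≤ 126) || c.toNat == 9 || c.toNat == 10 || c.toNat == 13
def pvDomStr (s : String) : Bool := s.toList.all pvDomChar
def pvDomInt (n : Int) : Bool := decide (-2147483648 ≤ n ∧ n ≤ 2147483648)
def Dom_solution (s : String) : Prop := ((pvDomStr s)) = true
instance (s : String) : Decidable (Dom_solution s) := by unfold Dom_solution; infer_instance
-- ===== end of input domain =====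

-- B replaces A's single counting pass by a two-stage algorithm: build per-character
-- prefix-count tables, then jump from segment start to segment end by arithmetic on
-- the tables (objective: alternative; same task, different algorithmic structure).

-- ===== PORT A =====
-- step of A's for-loop; state = (answer, first_cnt, not_cnt, first)
def stepA (st : Int × Int × Int × Char) (i : Char) : Int × Int × Int × Char :=
  match st with
  | (answer, fc, nc, first) =>
    if fc = nc then (answer + 1, fc + 1, nc, i)
    else if first = i then (answer, fc + 1, nc, first)
    else (answer, fc, nc + 1, first)

-- Python's first = '' is an empty string; it is only read after being overwritten
-- (fc = nc holds initially), so a dummy Char initial value is exact.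
def solution (s : String) : Int :=
  (s.toList.foldl stepA (0, 0, 0, ' ')).1

-- ===== PORT B =====
-- inner for-loop of stage 1: row = [0]; c = 0; for ch in s: c += (ch==x); row.append(c)
def rowStepB (x : Char) (st : List Int × Int) (ch : Char) : List Int × Int :=
  let c' := if ch = x then st.2 + 1 else st.2
  (st.1 ++ [c'], c')

def rowB (x : Char) (s : List Char) : List Int :=
  (s.foldl (rowStepB x) ([0], 0)).1

-- stage 1: for x in set(s): prefix[x] = row   (the dict is only looked up afterwards,
-- so iterating the set is order-independent)
def buildPrefixB (s : List Char) : PySem.Dict Char (List Int) :=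
  (PySem.Set.ofList s).foldl (fun d x => d.insert x (rowB x s)) PySem.Dict.empty

-- inner while-loop of stage 2; p[j], p[i] are always in range (0 ≤ i < j ≤ n = len p - 1),
-- so the total index form pyGetD is exact
def innerB (p : List Int) (i n j : Int) : Int :=
  if h : j < n ∧ 2 * (PySem.List.pyGetD p j 0 - PySem.List.pyGetD p i 0) ≠ j - i then
    innerB p i n (j + 1)
  else j
termination_by (n - j).toNat
decreasing_by omega

-- the port's outer loop needs i < innerB … (i+1) for termination, so this fact stays above it
theorem le_innerB (p : List Int) (i n : Int) :
    ∀ j, j ≤ innerB p i n j := by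
  intro j
  induction hk : (n - j).toNat using Nat.strong_induction_on generalizing j with
  | _ k ih =>
    unfold innerB
    split
    · rename_i h
      exact le_trans (by omega) (ih (n - (j + 1)).toNat (by omega) (j + 1) rfl)
    · exact le_refl j

-- outer while-loop of stage 2; s[i] is always in range (0 ≤ i < n = len s)
def outerB (s : List Char) (pre : PySem.Dict Char (List Int)) (n answer i : Int) : Int :=
  if h : i < n then
    let p := (pre.get? (PySem.List.pyGetD s i ' ')).getD []
    outerB s pre n (answer + 1) (innerB p i n (i + 1))
  else answer
termination_by (n - i).toNat
decreasing_by
  have := le_innerB ((pre.get? (PySem.List.pyGetD s i ' ')).getD []) i n (i + 1)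
  omega

def solution_alt (s : String) : Int :=
  outerB s.toList (buildPrefixB s.toList) (s.toList.length : Int) 0 0

-- ===== PRECONDITION & SPEC =====
def Spec_solution (s : String) (out : Int) : Prop := out = solution_alt s
instance (s : String) (out : Int) : Decidable (Spec_solution s out) := by unfold Spec_solution; infer_instance

-- ===== CLAIM (what is proved, stated in full; the proofs are below) =====
def Claim_equal_solution : Prop := ∀ (s : String), Dom_solution s → Spec_solution s (solution s)

-- ===== LEMMAS AND PROOFS =====

-- Common reference: the segment recursion. consumeB consumes chars counting
-- same/diff against the anchor until they balance; loopB counts segments.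
def consumeB (x : Char) (same diff : Int) : List Char → List Char
  | [] => []
  | c :: rest =>
    let same' := if c = x then same + 1 else same
    let diff' := if c = x then diff else diff + 1
    if same' = diff' then rest else consumeB x same' diff' rest

theorem consumeB_length_le (x : Char) :
    ∀ (l : List Char) (s d : Int), (consumeB x s d l).length ≤ l.length := by
  intro l
  induction l with
  | nil => intro s d; simp [consumeB]
  | cons c rest ih =>
    intro s d
    by_cases hc : c = x
    · rw [show consumeB x s d (c :: rest)
          = (if s + 1 = d then rest else consumeB x (s + 1) d rest) from by
        simp [consumeB, hc]]
      split
      · simp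
      · exact le_trans (ih _ _) (Nat.le_succ _)
    · rw [show consumeB x s d (c :: rest)
          = (if s = d + 1 then rest else consumeB x s (d + 1) rest) from by
        simp [consumeB, hc]]
      split
      · simp
      · exact le_trans (ih _ _) (Nat.le_succ _)

def loopB : List Char → Int
  | [] => 0
  | c :: rest => 1 + loopB (consumeB c 1 0 rest)
termination_by l => l.length
decreasing_by
  exact Nat.lt_succ_of_le (consumeB_length_le _ rest _ _)

-- ---- A's fold equals loopB ----
-- Joint invariant, strong induction on the length of the remaining list:
-- (outer) from a balanced state (fc = nc), A's fold adds exactly loopB l to answer;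
-- (inner) mid-segment with anchor x, if fc - nc = same - diff > 0 then A's fold
--         adds exactly loopB (consumeB x same diff l) to answer.
theorem keyA (n : Nat) : ∀ l : List Char, l.length ≤ n →
    (∀ (a fc nc : Int) (first : Char), fc = nc →
        (l.foldl stepA (a, fc, nc, first)).1 = a + loopB l) ∧
    (∀ (a fc nc sm d : Int) (x : Char), fc - nc = sm - d → 0 < sm - d →
        (l.foldl stepA (a, fc, nc, x)).1 = a + loopB (consumeB x sm d l)) := by
  induction n with
  | zero =>
    intro l hl
    have : l = [] := List.eq_nil_of_length_eq_zero (Nat.le_zero.mp hl)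
    subst this
    constructor
    · intro a fc nc first _; simp [loopB]
    · intro a fc nc sm d x _ _; simp [consumeB, loopB]
  | succ n ih =>
    intro l hl
    constructor
    · intro a fc nc first hbal
      match l with
      | [] => simp [loopB]
      | c :: rest =>
        have hr : rest.length ≤ n := Nat.le_of_succ_le_succ hl
        simp only [List.foldl_cons, stepA, if_pos hbal]
        have := (ih rest hr).2 (a + 1) (fc + 1) nc 1 0 c (by omega) (by omega)
        rw [this, loopB]
        ring
    · intro a fc nc sm d x heq hpos
      match l with
      | [] => simp [consumeB, loopB]
      | c :: rest =>
        have hr : rest.length ≤ n := Nat.le_of_succ_le_succ hl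
        have hne : ¬ fc = nc := by omega
        simp only [List.foldl_cons, stepA, if_neg hne]
        by_cases hc : x = c
        · rw [if_pos hc]
          have hcx : c = x := hc.symm
          rw [show consumeB x sm d (c :: rest)
              = (if sm + 1 = d then rest else consumeB x (sm + 1) d rest) from by
            simp [consumeB, hcx]]
          have hb : ¬ sm + 1 = d := by omega
          rw [if_neg hb]
          exact (ih rest hr).2 a (fc + 1) nc (sm + 1) d x (by omega) (by omega)
        · rw [if_neg hc]
          have hcx : ¬ c = x := fun h => hc h.symm
          rw [show consumeB x sm d (c :: rest)
              = (if sm = d + 1 then rest else consumeB x sm (d + 1) rest) from by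
            simp [consumeB, hcx]]
          by_cases hb : sm = d + 1
          · rw [if_pos hb]
            exact (ih rest hr).1 a fc (nc + 1) x (by omega)
          · rw [if_neg hb]
            exact (ih rest hr).2 a fc (nc + 1) sm (d + 1) x (by omega) (by omega)

-- ---- the prefix-count table reads back counts of prefixes ----
-- closed form of the row loop's tail
def rowsB (x : Char) (c : Int) : List Char → List Int
  | [] => []
  | ch :: t =>
    let c' := if ch = x then c + 1 else c
    c' :: rowsB x c' t

theorem foldl_rowStepB (x : Char) :
    ∀ (l : List Char) (row : List Int) (c : Int),
      l.foldl (rowStepB x) (row, c) = (row ++ rowsB x c l, c + (l.count x : Int)) := by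
  intro l
  induction l with
  | nil => intro row c; simp [rowsB]
  | cons ch t ih =>
    intro row c
    by_cases hc : ch = x
    · simp [rowStepB, rowsB, hc, ih]
      ring
    · simp [rowStepB, rowsB, hc, ih]

theorem length_rowsB (x : Char) (c : Int) :
    ∀ l : List Char, (rowsB x c l).length = l.length := by
  intro l
  induction l generalizing c with
  | nil => simp [rowsB]
  | cons ch t ih => simp [rowsB, ih]

theorem rowsB_get? (x : Char) :
    ∀ (l : List Char) (c : Int) (k : Nat), k < l.length →
      (rowsB x c l)[k]? = some (c + ((l.take (k + 1)).count x : Int)) := by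
  intro l
  induction l with
  | nil => intro c k hk; simp at hk
  | cons ch t ih =>
    intro c k hk
    have hrow : rowsB x c (ch :: t)
        = (if ch = x then c + 1 else c) :: rowsB x (if ch = x then c + 1 else c) t := rfl
    rw [hrow]
    match k with
    | 0 =>
      by_cases hc : ch = x
      · simp [hc]
      · simp [hc]
    | k + 1 =>
      have hk' : k < t.length := by simpa using hk
      rw [List.getElem?_cons_succ, ih _ _ hk']
      by_cases hc : ch = x
      · simp [hc]
        ring
      · simp [hc]

theorem rowB_eq (x : Char) (s : List Char) : rowB x s = 0 :: rowsB x 0 s := by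
  simp [rowB, foldl_rowStepB]

theorem length_rowB (x : Char) (s : List Char) : (rowB x s).length = s.length + 1 := by
  simp [rowB_eq, length_rowsB]

-- p[j] = count of x in s[:j], for 0 ≤ j ≤ len s
theorem rowB_read (x : Char) (s : List Char) (j : Int) (h0 : 0 ≤ j) (hn : j ≤ (s.length : Int)) :
    PySem.List.pyGetD (rowB x s) j 0 = ((s.take j.toNat).count x : Int) := by
  rw [PySem.List.pyGetD_eq_getElem _ _ h0 (by rw [length_rowB]; push_cast; omega)]
  have hlen : j.toNat < (rowB x s).length := by rw [length_rowB]; omega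
  have hsome : (rowB x s)[j.toNat]? = some (((s.take j.toNat).count x : Int)) := by
    rw [rowB_eq]
    match hj : j.toNat with
    | 0 => simp
    | k + 1 =>
      rw [List.getElem?_cons_succ, rowsB_get? x s 0 k (by omega)]
      simp
  have := List.getElem?_eq_getElem hlen
  rw [this] at hsome
  exact Option.some.inj hsome

-- ---- stage-1 dict: lookup of a character of s yields its row ----
theorem get?_foldl_insert (s : List Char) (y : Char) :
    ∀ (ks : List Char) (d : PySem.Dict Char (List Int)),
      ((ks.foldl (fun d x => d.insert x (rowB x s)) d).get? y)
        = if y ∈ ks then some (rowB y s) else d.get? y := by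
  intro ks
  induction ks with
  | nil => intro d; simp
  | cons k t ih =>
    intro d
    rw [List.foldl_cons, ih]
    by_cases ht : y ∈ t
    · simp [ht]
    · by_cases hk : y = k
      · subst hk
        simp [ht, PySem.Dict.get?_insert_self]
      · simp [ht, hk, PySem.Dict.get?_insert_of_ne d (rowB k s) hk]

theorem buildPrefixB_get (s : List Char) (y : Char) (hy : y ∈ s) :
    ((buildPrefixB s).get? y).getD [] = rowB y s := by
  rw [buildPrefixB, get?_foldl_insert]
  simp [(PySem.Set.mem_ofList s y).mpr hy]

-- ---- stage-2 inner loop finds exactly where consumeB stops ----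
-- invariant: at index j, sm/d are the same/diff counts of the segment s[i:j]
theorem innerB_consume (s : List Char) (x : Char) (i : Int) (h0 : 0 ≤ i) :
    ∀ (m : Nat) (j : Int), ((s.length : Int) - j).toNat ≤ m → i < j → j ≤ (s.length : Int) →
      ∀ (sm d : Int),
        sm = ((s.take j.toNat).count x : Int) - ((s.take i.toNat).count x : Int) →
        d = (j - i) - sm →
        sm ≠ d →
        s.drop (innerB (rowB x s) i (s.length : Int) j).toNat
          = consumeB x sm d (s.drop j.toNat) ∧
        innerB (rowB x s) i (s.length : Int) j ≤ (s.length : Int) := by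
  intro m
  induction m with
  | zero =>
    intro j hm hij hjn sm d hsm hd hne
    have hj : j = (s.length : Int) := by omega
    subst hj
    unfold innerB
    rw [dif_neg (by omega)]
    constructor
    · have hnn : ((s.length : Nat) : Int).toNat = s.length := by omega
      rw [hnn, List.drop_length]
      simp [consumeB]
    · omega
  | succ m ih =>
    intro j hm hij hjn sm d hsm hd hne
    by_cases hjlt : j < (s.length : Int)
    · -- current check: balance at j is nonzero (hne), so the loop advances
      have hcond : 2 * (PySem.List.pyGetD (rowB x s) j 0 - PySem.List.pyGetD (rowB x s) i 0)
          ≠ j - i := by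
        rw [rowB_read x s j (by omega) (by omega),
            rowB_read x s i h0 (by omega)]
        omega
      rw [show innerB (rowB x s) i (s.length : Int) j
            = innerB (rowB x s) i (s.length : Int) (j + 1) from by
        conv_lhs => unfold innerB
        rw [dif_pos ⟨hjlt, hcond⟩]]
      -- the character consumed
      have hjr : j.toNat < s.length := by omega
      have hdrop : s.drop j.toNat = s[j.toNat] :: s.drop (j.toNat + 1) :=
        List.drop_eq_getElem_cons hjr
      have htake : s.take (j.toNat + 1) = s.take j.toNat ++ [s[j.toNat]] :=
        List.take_succ_eq_append_getElem hjr
      set c := s[j.toNat] with hc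
      have hj1 : (j + 1).toNat = j.toNat + 1 := by omega
      by_cases hcx : c = x
      · have hsm' : sm + 1 = ((s.take (j+1).toNat).count x : Int)
            - ((s.take i.toNat).count x : Int) := by
          rw [hj1, htake, List.count_append]
          simp [hcx]
          omega
        by_cases hb : sm + 1 = d
        · -- balance reaches zero at j+1: both stop there
          rw [show innerB (rowB x s) i (s.length : Int) (j + 1) = j + 1 from by
            unfold innerB
            rw [dif_neg (by
              rw [rowB_read x s (j+1) (by omega) (by omega),
                  rowB_read x s i h0 (by omega)]
              omega)]]
          constructor
          · rw [hdrop]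
            rw [show consumeB x sm d (c :: s.drop (j.toNat + 1))
                = (if sm + 1 = d then s.drop (j.toNat + 1)
                   else consumeB x (sm + 1) d (s.drop (j.toNat + 1))) from by
              simp [consumeB, hcx]]
            rw [if_pos hb, hj1]
          · omega
        · have := ih (j + 1) (by omega) (by omega) (by omega) (sm + 1) d hsm' (by omega) hb
          constructor
          · rw [this.1, hdrop]
            rw [show consumeB x sm d (c :: s.drop (j.toNat + 1))
                = (if sm + 1 = d then s.drop (j.toNat + 1)
                   else consumeB x (sm + 1) d (s.drop (j.toNat + 1))) from by
              simp [consumeB, hcx]]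
            rw [if_neg hb, hj1]
          · exact this.2
      · have hsm' : sm = ((s.take (j+1).toNat).count x : Int)
            - ((s.take i.toNat).count x : Int) := by
          rw [hj1, htake, List.count_append]
          have hc0 : List.count x [c] = 0 := by
            rw [List.count_eq_zero]
            intro hmem
            have hxc : x = c := by simpa using hmem
            exact hcx hxc.symm
          rw [hc0]
          omega
        by_cases hb : sm = d + 1
        · rw [show innerB (rowB x s) i (s.length : Int) (j + 1) = j + 1 from by
            unfold innerB
            rw [dif_neg (by
              rw [rowB_read x s (j+1) (by omega) (by omega),
                  rowB_read x s i h0 (by omega)]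
              omega)]]
          constructor
          · rw [hdrop]
            rw [show consumeB x sm d (c :: s.drop (j.toNat + 1))
                = (if sm = d + 1 then s.drop (j.toNat + 1)
                   else consumeB x sm (d + 1) (s.drop (j.toNat + 1))) from by
              simp [consumeB, hcx]]
            rw [if_pos hb, hj1]
          · omega
        · have := ih (j + 1) (by omega) (by omega) (by omega) sm (d + 1) hsm' (by omega) hb
          constructor
          · rw [this.1, hdrop]
            rw [show consumeB x sm d (c :: s.drop (j.toNat + 1))
                = (if sm = d + 1 then s.drop (j.toNat + 1)
                   else consumeB x sm (d + 1) (s.drop (j.toNat + 1))) from by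
              simp [consumeB, hcx]]
            rw [if_neg hb, hj1]
          · exact this.2
    · -- j = n: the loop stops; consumeB on [] also stops
      have hj : j = (s.length : Int) := by omega
      subst hj
      unfold innerB
      rw [dif_neg (by omega)]
      constructor
      · have hnn : ((s.length : Nat) : Int).toNat = s.length := by omega
        rw [hnn, List.drop_length]
        simp [consumeB]
      · omega

-- ---- stage-2 outer loop equals loopB on the remaining suffix ----
theorem outerB_loopB (s : List Char) :
    ∀ (m : Nat) (i a : Int), ((s.length : Int) - i).toNat ≤ m → 0 ≤ i → i ≤ (s.length : Int) →
      outerB s (buildPrefixB s) (s.length : Int) a i = a + loopB (s.drop i.toNat) := by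
  intro m
  induction m with
  | zero =>
    intro i a hm h0 hn
    have hi : i = (s.length : Int) := by omega
    subst hi
    unfold outerB
    rw [dif_neg (by omega)]
    rw [List.drop_eq_nil_of_le (by omega)]
    simp [loopB]
  | succ m ih =>
    intro i a hm h0 hn
    by_cases hlt : i < (s.length : Int)
    · have hir : i.toNat < s.length := by omega
      have hsx : PySem.List.pyGetD s i ' ' = s[i.toNat] :=
        PySem.List.pyGetD_eq_getElem s ' ' h0 (by omega)
      set x := s[i.toNat] with hx
      have hmem : x ∈ s := List.getElem_mem hir
      have hdict : ((buildPrefixB s).get? (PySem.List.pyGetD s i ' ')).getD [] = rowB x s := by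
        rw [hsx]; exact buildPrefixB_get s x hmem
      rw [show outerB s (buildPrefixB s) (s.length : Int) a i
            = outerB s (buildPrefixB s) (s.length : Int) (a + 1)
                (innerB (rowB x s) i (s.length : Int) (i + 1)) from by
        conv_lhs => unfold outerB
        rw [dif_pos hlt]
        rw [show ((buildPrefixB s).get? (PySem.List.pyGetD s i ' ')).getD [] = rowB x s from hdict]]
      have hi1 : (i + 1).toNat = i.toNat + 1 := by omega
      have htake : s.take (i.toNat + 1) = s.take i.toNat ++ [x] :=
        List.take_succ_eq_append_getElem hir
      have hinner := innerB_consume s x i h0 (((s.length : Int) - (i+1)).toNat) (i + 1)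
        le_rfl (by omega) (by omega) 1 0
        (by rw [hi1, htake, List.count_append]; simp)
        (by omega) (by omega)
      set j := innerB (rowB x s) i (s.length : Int) (i + 1) with hj
      have hjge : i + 1 ≤ j := le_innerB _ _ _ _
      have hjle : j ≤ (s.length : Int) := hinner.2
      rw [ih j (a + 1) (by omega) (by omega) hjle]
      rw [hinner.1]
      have hdropi : s.drop i.toNat = x :: s.drop (i.toNat + 1) :=
        List.drop_eq_getElem_cons hir
      rw [hdropi, loopB, hi1]
      ring
    · have hi : i = (s.length : Int) := by omega
      subst hi
      unfold outerB
      rw [dif_neg (by omega)]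
      rw [List.drop_eq_nil_of_le (by omega)]
      simp [loopB]

-- ===== VERDICT (by name: the statement is the Claim_ definition above) =====
theorem solution_spec : Claim_equal_solution := by
  intro s _
  unfold Spec_solution solution solution_alt
  have hA := (keyA s.toList.length s.toList le_rfl).1 0 0 0 ' ' rfl
  have hB := outerB_loopB s.toList (s.toList.length) 0 0 (by omega) (by omega) (by omega)
  rw [hA, hB]
  simp
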